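-- pv_equiv track=rewrite | github.com/jonas-bez/ASSEMBLY-ARM | decodificador /funcao.py | register_range
-- ===== SOURCE A (Python) =====
-- def register_range(reg1,reg2):
-- 	lis=list()
-- 	formatado=list()
--
-- 	for i in range(0,8):
-- 		if i>=reg1 and i<=reg2:
-- 			lis.append('1')
-- 		else:
-- 			lis.append('0')
--
-- 	formatado.append(lis[0]+lis[1]+lis[2]+lis[3]+lis[4]+lis[5]+lis[6]+lis[7])
-- 	var = formatado[0]
-- 	return var
-- ===== SOURCE B (Python) =====
-- def register_range(reg1, reg2):
--     lo = max(reg1, 0)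
--     hi = min(reg2, 7)
--     if lo <= hi:
--         return '0' * lo + '1' * (hi - lo + 1) + '0' * (7 - hi)
--     return '0' * 8
-- ===== Notes on version B (the rewrite author's own statement) =====
-- stated objective: simpler
-- what changed: Replaces the per-index loop over all 8 positions (plus list indexing and concatenation) with a closed-form construction from clamped bounds: three contiguous runs '0'*lo + '1'*(hi-lo+1) + '0'*(7-hi).
import Mathlib
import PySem

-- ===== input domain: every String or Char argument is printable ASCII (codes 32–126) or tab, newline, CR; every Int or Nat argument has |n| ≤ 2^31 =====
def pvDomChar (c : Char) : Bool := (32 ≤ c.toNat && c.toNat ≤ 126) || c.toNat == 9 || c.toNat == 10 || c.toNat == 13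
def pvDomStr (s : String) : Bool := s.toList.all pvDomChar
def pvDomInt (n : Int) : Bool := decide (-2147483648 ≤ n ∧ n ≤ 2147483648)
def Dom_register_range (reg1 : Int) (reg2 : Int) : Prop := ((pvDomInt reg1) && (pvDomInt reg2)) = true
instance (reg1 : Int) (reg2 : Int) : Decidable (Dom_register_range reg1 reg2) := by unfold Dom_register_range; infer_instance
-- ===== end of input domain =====

-- B builds the 8-char string from clamped bounds as three contiguous runs instead of testing each of the 8 positions (objective: simpler).

-- ===== PORT A =====
-- literal port of A: build lis over range(0,8), then concatenate lis[0]..lis[7].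
-- lis[i]/formatado[0] indexing uses pyGet? with getD ""; the index is always in range
-- (lis has exactly 8 elements, formatado exactly 1), so the default is never taken.
def register_range (reg1 : Int) (reg2 : Int) : String :=
  let lis : List String :=
    (PySem.List.pyRange 0 8 1).foldl
      (fun lis i => lis ++ [if reg1 ≤ i ∧ i ≤ reg2 then "1" else "0"]) []
  let formatado : List String :=
    [((PySem.List.pyGet? lis 0).getD "") ++ ((PySem.List.pyGet? lis 1).getD "") ++
     ((PySem.List.pyGet? lis 2).getD "") ++ ((PySem.List.pyGet? lis 3).getD "") ++
     ((PySem.List.pyGet? lis 4).getD "") ++ ((PySem.List.pyGet? lis 5).getD "") ++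
     ((PySem.List.pyGet? lis 6).getD "") ++ ((PySem.List.pyGet? lis 7).getD "")]
  let var := (PySem.List.pyGet? formatado 0).getD ""
  var

-- ===== PORT B =====
-- '0'*n on a nonnegative count is String.mk (List.replicate n.toNat '0')
def register_range_alt (reg1 : Int) (reg2 : Int) : String :=
  if max reg1 0 ≤ min reg2 7 then
    String.mk (List.replicate (max reg1 0).toNat '0' ++
               List.replicate (min reg2 7 - max reg1 0 + 1).toNat '1' ++
               List.replicate (7 - min reg2 7).toNat '0')
  else
    String.mk (List.replicate 8 '0')

-- ===== PRECONDITION & SPEC =====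
def Spec_register_range (reg1 : Int) (reg2 : Int) (out : String) : Prop := out = register_range_alt reg1 reg2
instance (reg1 : Int) (reg2 : Int) (out : String) : Decidable (Spec_register_range reg1 reg2 out) := by unfold Spec_register_range; infer_instance

-- ===== CLAIM (what is proved, stated in full; the proofs are below) =====
def Claim_equal_register_range : Prop := ∀ (reg1 : Int) (reg2 : Int), Dom_register_range reg1 reg2 → Spec_register_range reg1 reg2 (register_range reg1 reg2)

-- ===== LEMMAS AND PROOFS =====

-- A's value only depends on reg1 clamped to [0,8] and reg2 clamped to [-1,7].
theorem reduceA (reg1 reg2 a b : Int)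
    (ha : a = min (max reg1 0) 8) (hb : b = max (min reg2 7) (-1)) :
    register_range reg1 reg2 = register_range a b := by
  have hR : PySem.List.pyRange 0 8 1 = [0, 1, 2, 3, 4, 5, 6, 7] := by decide
  have e : ∀ i : Int, 0 ≤ i → i ≤ 7 → ((reg1 ≤ i ∧ i ≤ reg2) ↔ (a ≤ i ∧ i ≤ b)) := by
    intro i h1 h2; omega
  simp only [register_range, hR, List.foldl, List.nil_append,
    PySem.List.pyGet?, PySem.List.pyIdx?]
  simp only [e 0 (by norm_num) (by norm_num), e 1 (by norm_num) (by norm_num),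
    e 2 (by norm_num) (by norm_num), e 3 (by norm_num) (by norm_num),
    e 4 (by norm_num) (by norm_num), e 5 (by norm_num) (by norm_num),
    e 6 (by norm_num) (by norm_num), e 7 (by norm_num) (by norm_num)]

-- B's value only depends on the same clamped bounds.
theorem reduceB (reg1 reg2 a b : Int)
    (ha : a = min (max reg1 0) 8) (hb : b = max (min reg2 7) (-1)) :
    register_range_alt reg1 reg2 = register_range_alt a b := by
  simp only [register_range_alt]
  by_cases h : max reg1 0 ≤ min reg2 7
  · rw [if_pos h, if_pos (by omega)]
    rw [show (max reg1 0).toNat = (max a 0).toNat by omega,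
        show (min reg2 7 - max reg1 0 + 1).toNat = (min b 7 - max a 0 + 1).toNat by omega,
        show (7 - min reg2 7).toNat = (7 - min b 7).toNat by omega]
  · rw [if_neg h, if_neg (by omega)]

-- ===== VERDICT (by name: the statement is the Claim_ definition above) =====
theorem register_range_spec : Claim_equal_register_range := by
  intro reg1 reg2 _
  unfold Spec_register_range
  rw [reduceA reg1 reg2 (min (max reg1 0) 8) (max (min reg2 7) (-1)) rfl rfl,
      reduceB reg1 reg2 (min (max reg1 0) 8) (max (min reg2 7) (-1)) rfl rfl]
  generalize hA : min (max reg1 0) 8 = a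
  generalize hB : max (min reg2 7) (-1) = b
  have ha1 : 0 ≤ a := by omega
  have ha2 : a ≤ 8 := by omega
  have hb1 : -1 ≤ b := by omega
  have hb2 : b ≤ 7 := by omega
  clear hA hB
  interval_cases a <;> interval_cases b <;> decide
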